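-- pv_equiv track=rewrite | github.com/swakana0327/dobutshu_shogi | dobutsushogi_module.py | get_airarea
-- ===== SOURCE A (Python) =====
-- def get_airarea(my_dict,your_dict):#空きエリアリストを返す。
--     air_area=[1,2,3,4,5,6,7,8,9,10,11,12]
--     for k,v in my_dict.items():
--         if v in air_area:
--             air_area.remove(v)
--
--     for k,v in your_dict.items():
--         if v in air_area:
--             air_area.remove(v)
--
--     return air_area #空いているエリアリスト
-- ===== SOURCE B (Python) =====
-- def get_airarea(my_dict, your_dict):
--     occupied = set(my_dict.values()) | set(your_dict.values())
--     return [a for a in range(1, 13) if a not in occupied]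
-- ===== Notes on version B (the rewrite author's own statement) =====
-- stated objective: simpler
-- what changed: B builds the occupied set once and filters the fixed universe 1..12, instead of iterating both dicts and removing from a mutable list; removal/membership passes over the list disappear.
import Mathlib
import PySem

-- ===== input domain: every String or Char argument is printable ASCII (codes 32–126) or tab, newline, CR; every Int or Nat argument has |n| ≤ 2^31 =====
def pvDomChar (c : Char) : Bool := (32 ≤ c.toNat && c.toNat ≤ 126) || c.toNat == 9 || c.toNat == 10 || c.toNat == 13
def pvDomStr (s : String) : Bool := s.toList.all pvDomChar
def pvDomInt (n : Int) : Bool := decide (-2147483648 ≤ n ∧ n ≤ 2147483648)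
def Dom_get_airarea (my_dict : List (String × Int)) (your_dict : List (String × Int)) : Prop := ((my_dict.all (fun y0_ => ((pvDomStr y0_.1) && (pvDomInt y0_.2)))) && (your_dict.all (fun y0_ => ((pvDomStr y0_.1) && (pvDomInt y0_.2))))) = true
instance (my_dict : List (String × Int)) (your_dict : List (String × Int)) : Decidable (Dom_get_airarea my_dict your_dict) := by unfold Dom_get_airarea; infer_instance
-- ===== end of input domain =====

-- B builds the occupied set once and filters the fixed universe 1..12, instead of iterating both dicts and removing from a mutable list (objective: simpler).


-- ===== PORT A =====
-- one loop body: 'if v in air_area: air_area.remove(v)'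
def pvRemoveStep (area : List Int) (kv : String × Int) : List Int :=
  if area.contains kv.2 then (PySem.List.remove? area kv.2).getD area else area

def get_airarea (my_dict : List (String × Int)) (your_dict : List (String × Int)) : List Int :=
  let air_area : List Int := [1,2,3,4,5,6,7,8,9,10,11,12]
  let air_area := my_dict.foldl pvRemoveStep air_area
  let air_area := your_dict.foldl pvRemoveStep air_area
  air_area

-- ===== PORT B =====
def get_airarea_alt (my_dict : List (String × Int)) (your_dict : List (String × Int)) : List Int :=
  let occupied : PySem.Set Int :=
    PySem.Set.union (PySem.Set.ofList (my_dict.map Prod.snd))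
                    (PySem.Set.ofList (your_dict.map Prod.snd))
  (PySem.List.pyRange 1 13 1).filter (fun a => !(PySem.Set.contains occupied a))

-- ===== PRECONDITION & SPEC =====
def Spec_get_airarea (my_dict : List (String × Int)) (your_dict : List (String × Int)) (out : List Int) : Prop := out = get_airarea_alt my_dict your_dict
instance (my_dict : List (String × Int)) (your_dict : List (String × Int)) (out : List Int) : Decidable (Spec_get_airarea my_dict your_dict out) := by unfold Spec_get_airarea; infer_instance

-- ===== CLAIM (what is proved, stated in full; the proofs are below) =====
def Claim_equal_get_airarea : Prop := ∀ (my_dict : List (String × Int)) (your_dict : List (String × Int)), Dom_get_airarea my_dict your_dict → Spec_get_airarea my_dict your_dict (get_airarea my_dict your_dict)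

-- ===== LEMMAS AND PROOFS =====

-- A's remove loop over a duplicate-free area is a filter by the dict's values.
theorem foldl_pvRemoveStep (ds : List (String × Int)) (area : List Int) (h : area.Nodup) :
    ds.foldl pvRemoveStep area = area.filter (fun x => !((ds.map Prod.snd).contains x)) := by
  induction ds generalizing area with
  | nil => simp
  | cons kv ds ih =>
    simp only [List.foldl_cons, List.map_cons]
    by_cases hv : kv.2 ∈ area
    · have hstep : pvRemoveStep area kv = area.erase kv.2 := by
        simp [pvRemoveStep, PySem.List.remove?_eq_some_erase area kv.2 hv, hv]
      rw [hstep, ih _ (h.erase kv.2), h.erase_eq_filter kv.2]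
      rw [List.filter_filter]
      apply List.filter_congr
      intro x _
      by_cases hx : x = kv.2 <;> simp [hx, bne, Bool.and_comm]
    · have hstep : pvRemoveStep area kv = area := by
        simp [pvRemoveStep, hv]
      rw [hstep, ih _ h]
      apply List.filter_congr
      intro x hxmem
      have hx : x ≠ kv.2 := fun he => hv (he ▸ hxmem)
      simp [hx]

theorem get_airarea_spec : Claim_equal_get_airarea := by
  intro my_dict your_dict _
  show get_airarea my_dict your_dict = get_airarea_alt my_dict your_dict
  unfold get_airarea get_airarea_alt
  dsimp only
  have h0 : ([1,2,3,4,5,6,7,8,9,10,11,12] : List Int).Nodup := by decide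
  rw [foldl_pvRemoveStep _ _ h0,
      foldl_pvRemoveStep _ _ (List.Nodup.filter _ h0),
      List.filter_filter]
  have hrange : PySem.List.pyRange 1 13 1 = ([1,2,3,4,5,6,7,8,9,10,11,12] : List Int) := by decide
  rw [hrange]
  apply List.filter_congr
  intro x _
  have hmem : (x ∈ PySem.Set.union (PySem.Set.ofList (my_dict.map Prod.snd))
      (PySem.Set.ofList (your_dict.map Prod.snd))) ↔
      (x ∈ my_dict.map Prod.snd ∨ x ∈ your_dict.map Prod.snd) := by
    rw [PySem.Set.mem_union]
    simp [PySem.Set.mem_ofList]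
  rw [Bool.eq_iff_iff]
  simp [hmem]
  tauto

-- ===== VERDICT (by name: the statement is the Claim_ definition above) =====
-- (the verdict theorem get_airarea_spec is proved directly above)
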